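-- pv_equiv track=rewrite | github.com/didges/spb-vk-mini | backend/filter_date.py | filter_duration
-- ===== SOURCE A (Python) =====
-- def filter_duration(dates, desc, time):
--     set_dates = set()
--     for date in desc.keys():
--         if time == 2 and desc[date]["long"] > 2:
--             set_dates.add(date)
--
--         elif time == 4 and desc[date]["long"] > 4:
--             set_dates.add(date)
--
--     res = dates - set_dates
--     return res if len(res) else dates
-- ===== SOURCE B (Python) =====
-- def filter_duration(dates, desc, time):
--     if time != 2 and time != 4:
--         return dates
--     res = {d for d in dates if not (d in desc and desc[d]["long"] > time)}
--     return res if res else dates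
-- ===== Notes on version B (the rewrite author's own statement) =====
-- stated objective: simpler
-- what changed: B derives the threshold directly from time (2 or 4, otherwise no filtering and an early return of dates) and builds the kept set in one comprehension over dates with a guarded desc lookup, instead of A's scan over desc.keys() building a removal set and then taking a set difference.
import Mathlib
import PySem

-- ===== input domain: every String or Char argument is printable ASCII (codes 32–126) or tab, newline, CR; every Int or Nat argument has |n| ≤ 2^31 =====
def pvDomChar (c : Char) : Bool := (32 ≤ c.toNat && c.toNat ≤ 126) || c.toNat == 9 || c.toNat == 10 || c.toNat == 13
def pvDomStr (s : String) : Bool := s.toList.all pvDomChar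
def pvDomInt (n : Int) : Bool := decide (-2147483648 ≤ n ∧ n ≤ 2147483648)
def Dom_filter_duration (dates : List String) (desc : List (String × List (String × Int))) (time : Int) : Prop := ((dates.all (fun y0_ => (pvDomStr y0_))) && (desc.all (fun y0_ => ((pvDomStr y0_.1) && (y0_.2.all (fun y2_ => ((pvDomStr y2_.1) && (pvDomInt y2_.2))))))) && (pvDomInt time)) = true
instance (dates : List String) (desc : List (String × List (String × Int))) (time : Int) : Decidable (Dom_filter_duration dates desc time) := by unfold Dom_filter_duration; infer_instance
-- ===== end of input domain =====

-- B: threshold taken directly from time with an early return when time is neither 2 nor 4,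
-- and one filtering pass over dates with a guarded desc lookup, replacing A's scan over
-- desc.keys() that builds a removal set followed by a set difference (objective: simpler).

-- ===== PORT A =====
-- desc[date]["long"] with default 0; used only under Pre_ (the "long" key is present)
def pvLong (v : List (String × Int)) : Int := (PySem.Dict.mk v).getD "long" 0

def filter_duration (dates : List String) (desc : List (String × List (String × Int))) (time : Int) : List String :=
  -- for date in desc.keys(): dict keys = first occurrences in order, value = first match
  let set_dates : PySem.Set String :=
    (PySem.List.dedup (desc.map Prod.fst)).foldl
      (fun s date =>
        if time = 2 ∧ pvLong ((PySem.Dict.mk desc).getD date []) > 2 then PySem.Set.add s date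
        else if time = 4 ∧ pvLong ((PySem.Dict.mk desc).getD date []) > 4 then PySem.Set.add s date
        else s)
      PySem.Set.empty
  let res := PySem.Set.diff dates set_dates
  if PySem.Set.len res ≠ 0 then res else dates

-- ===== PORT B =====
def filter_duration_alt (dates : List String) (desc : List (String × List (String × Int))) (time : Int) : List String :=
  if time ≠ 2 ∧ time ≠ 4 then dates
  else
    let res : PySem.Set String :=
      PySem.Set.ofList (dates.filter (fun d =>
        !((PySem.Dict.mk desc).contains d && decide (pvLong ((PySem.Dict.mk desc).getD d []) > time))))
    if PySem.Set.len res ≠ 0 then res else dates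

-- ===== PRECONDITION & SPEC =====
-- dates is a Python set, so its list encoding holds distinct elements; when time is 2 or 4
-- the Python A evaluates desc[date]["long"] for every key and raises KeyError if "long" is absent.
def Pre_filter_duration (dates : List String) (desc : List (String × List (String × Int))) (time : Int) : Prop :=
  dates.Nodup ∧ ((time = 2 ∨ time = 4) → ∀ p ∈ desc, (PySem.Dict.mk p.2).contains "long" = true)
instance (dates : List String) (desc : List (String × List (String × Int))) (time : Int) : Decidable (Pre_filter_duration dates desc time) := by unfold Pre_filter_duration; infer_instance

def pvWitness_filter_duration : List String × (List (String × List (String × Int))) × Int :=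
  (["a", "b"], [("a", [("long", 3)]), ("c", [("long", 1)])], 2)

def Spec_filter_duration (dates : List String) (desc : List (String × List (String × Int))) (time : Int) (out : List String) : Prop := out = filter_duration_alt dates desc time
instance (dates : List String) (desc : List (String × List (String × Int))) (time : Int) (out : List String) : Decidable (Spec_filter_duration dates desc time out) := by unfold Spec_filter_duration; infer_instance

-- ===== CLAIM (what is proved, stated in full; the proofs are below) =====
def Claim_equal_filter_duration : Prop := ∀ (dates : List String) (desc : List (String × List (String × Int))) (time : Int), Dom_filter_duration dates desc time → Pre_filter_duration dates desc time → Spec_filter_duration dates desc time (filter_duration dates desc time)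

-- ===== LEMMAS AND PROOFS =====

-- membership in the removal set built by A's loop
theorem mem_setDates_loop (desc : List (String × List (String × Int))) (time : Int)
    (keys : List String) (s : PySem.Set String) (y : String) :
    y ∈ keys.foldl
      (fun s date =>
        if time = 2 ∧ pvLong ((PySem.Dict.mk desc).getD date []) > 2 then PySem.Set.add s date
        else if time = 4 ∧ pvLong ((PySem.Dict.mk desc).getD date []) > 4 then PySem.Set.add s date
        else s) s
    ↔ y ∈ s ∨ (y ∈ keys ∧
        ((time = 2 ∧ pvLong ((PySem.Dict.mk desc).getD y []) > 2) ∨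
         (time = 4 ∧ pvLong ((PySem.Dict.mk desc).getD y []) > 4))) := by
  induction keys generalizing s with
  | nil => simp
  | cons k ks ih =>
    simp only [List.foldl_cons, List.mem_cons]
    split_ifs with h1 h2 <;> rw [ih] <;> (try simp only [PySem.Set.mem_add]) <;>
      rcases eq_or_ne y k with rfl | hne <;> tauto

-- A's removal set agrees with B's filter predicate on every element
theorem contains_setDates (desc : List (String × List (String × Int))) (time : Int)
    (ht : time = 2 ∨ time = 4) (d : String) :
    PySem.Set.contains
      ((PySem.List.dedup (desc.map Prod.fst)).foldl
        (fun s date =>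
          if time = 2 ∧ pvLong ((PySem.Dict.mk desc).getD date []) > 2 then PySem.Set.add s date
          else if time = 4 ∧ pvLong ((PySem.Dict.mk desc).getD date []) > 4 then PySem.Set.add s date
          else s)
        PySem.Set.empty) d
    = ((PySem.Dict.mk desc).contains d && decide (pvLong ((PySem.Dict.mk desc).getD d []) > time)) := by
  have hmem := mem_setDates_loop desc time (PySem.List.dedup (desc.map Prod.fst)) PySem.Set.empty d
  have hc : (PySem.Dict.mk desc).contains d = (desc.map Prod.fst).contains d := by
    simp [PySem.Dict.contains_eq_decide_mem_keys, PySem.Dict.keys_mk]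
  rcases ht with rfl | rfl <;>
    simp only [PySem.Set.contains_eq_listContains, hc] <;>
    by_cases hd : d ∈ desc.map Prod.fst <;>
    by_cases hl : pvLong ((PySem.Dict.mk desc).getD d []) > 2 ∨ pvLong ((PySem.Dict.mk desc).getD d []) > 4 <;>
    simp_all

-- ===== VERDICT (by name: the statement is the Claim_ definition above) =====
theorem filter_duration_spec : Claim_equal_filter_duration := by
  intro dates desc time _ hpre
  obtain ⟨hnd, -⟩ := hpre
  unfold Spec_filter_duration filter_duration filter_duration_alt
  set SD : PySem.Set String :=
    (PySem.List.dedup (desc.map Prod.fst)).foldl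
      (fun s date =>
        if time = 2 ∧ pvLong ((PySem.Dict.mk desc).getD date []) > 2 then PySem.Set.add s date
        else if time = 4 ∧ pvLong ((PySem.Dict.mk desc).getD date []) > 4 then PySem.Set.add s date
        else s)
      PySem.Set.empty with hSD
  by_cases ht : time ≠ 2 ∧ time ≠ 4
  · have hempty : ∀ y : String, y ∉ SD := by
      intro y hy
      rw [hSD, mem_setDates_loop] at hy
      rcases hy with hy | ⟨-, hy⟩
      · simp [PySem.Set.empty] at hy
      · rcases hy with ⟨h, -⟩ | ⟨h, -⟩ <;> [exact ht.1 h; exact ht.2 h]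
    have hdiff : PySem.Set.diff dates SD = dates := by
      show List.filter _ dates = dates
      exact List.filter_eq_self.mpr (fun a _ => by
        simp only [Bool.not_eq_eq_eq_not, Bool.not_true, PySem.Set.contains_eq_listContains]
        simpa using hempty a)
    show (if (PySem.Set.diff dates SD).len ≠ 0 then PySem.Set.diff dates SD else dates)
        = if time ≠ 2 ∧ time ≠ 4 then dates else _
    rw [if_pos ht, hdiff, ite_self]
  · have ht' : time = 2 ∨ time = 4 := by tauto
    have hres : PySem.Set.diff dates SD =
        PySem.Set.ofList (dates.filter (fun d =>
          !((PySem.Dict.mk desc).contains d && decide (pvLong ((PySem.Dict.mk desc).getD d []) > time)))) := by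
      rw [PySem.Set.ofList_eq_self_of_nodup _ (hnd.filter _)]
      show List.filter _ dates = _
      refine List.filter_congr (fun d _ => ?_)
      rw [hSD, contains_setDates desc time ht' d]
    show (if (PySem.Set.diff dates SD).len ≠ 0 then PySem.Set.diff dates SD else dates)
        = if time ≠ 2 ∧ time ≠ 4 then dates else _
    rw [if_neg ht, hres]
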